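-- pv_equiv track=rewrite | github.com/GKay-Dev/Project-Euler | problem=27.py | find_best_coefficients
-- ===== SOURCE A (Python) =====
-- def is_prime(n):
--     if n <= 1:
--         return False
--     if n <= 3:
--         return True
--     if n % 2 == 0 or n % 3 == 0:
--         return False
--     i = 5
--     while i * i <= n:
--         if n % i == 0 or n % (i + 2) == 0:
--             return False
--         i += 6
--     return True
--
-- def consecutive_primes_count(a, b):
--     n = 0
--     while True:
--         quadratic_value = n * n + a * n + b
--         if not is_prime(quadratic_value):
--             break
--         n += 1
--     return n
--
-- def find_best_coefficients(limit):
--     max_count = 0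
--     best_a = 0
--     best_b = 0
--     for a in range(-limit + 1, limit):
--         for b in range(-limit, limit + 1):
--             count = consecutive_primes_count(a, b)
--             if count > max_count:
--                 max_count = count
--                 best_a = a
--                 best_b = b
--     return best_a, best_b
-- ===== SOURCE B (Python) =====
-- def _is_prime(n):
--     if n <= 1:
--         return False
--     if n <= 3:
--         return True
--     if n % 2 == 0 or n % 3 == 0:
--         return False
--     i = 5
--     while i * i <= n:
--         if n % i == 0 or n % (i + 2) == 0:
--             return False
--         i += 6
--     return True
--
-- def _run_length(a, b, n=0):
--     # length of the consecutive-prime run of n^2 + a*n + b starting at n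
--     if not _is_prime(n * n + a * n + b):
--         return 0
--     return 1 + _run_length(a, b, n + 1)
--
-- def find_best_coefficients(limit):
--     # The run starts at n = 0 with value b, so b must itself be prime;
--     # if no prime b exists (limit < 2) no pair ever beats the zero run.
--     if limit < 2:
--         return (0, 0)
--     prime_bs = [b for b in range(2, limit + 1) if _is_prime(b)]
--     return max(((a, b) for a in range(-limit + 1, limit) for b in prime_bs),
--                key=lambda ab: _run_length(ab[0], ab[1]))
-- ===== Notes on version B (the rewrite author's own statement) =====
-- stated objective: faster
-- what changed: B filters the b-range once down to primes (the run must start with f(0)=b prime), builds the (a,b) candidate stream over that list only, and selects the winner with a single max-by-run-length pass (first maximum) instead of A's nested loops re-testing every b in [-limit,limit] per a and carrying a running best triple.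
import Mathlib
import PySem

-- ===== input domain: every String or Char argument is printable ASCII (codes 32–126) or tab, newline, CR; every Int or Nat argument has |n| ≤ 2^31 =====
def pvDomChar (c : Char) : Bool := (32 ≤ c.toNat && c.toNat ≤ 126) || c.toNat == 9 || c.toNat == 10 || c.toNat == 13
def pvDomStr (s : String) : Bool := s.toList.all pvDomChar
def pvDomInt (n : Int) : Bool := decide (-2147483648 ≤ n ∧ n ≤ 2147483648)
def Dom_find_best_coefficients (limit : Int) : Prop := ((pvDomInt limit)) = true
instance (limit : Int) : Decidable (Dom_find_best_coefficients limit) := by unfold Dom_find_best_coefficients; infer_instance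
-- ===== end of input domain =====

-- B filters the b-range once down to primes (f(0)=b must be prime), streams the (a,b)
-- candidates over that list only and picks the winner with one max-by-run-length pass
-- (first maximum), instead of A's nested loops testing every b per a with a running best.


-- ===== PORT A =====
-- is_prime: the 6k±1 trial-division loop. The Python `while i*i <= n` is ported with
-- fuel n.toNat, which exceeds the number of iterations (i starts at 5 and grows by 6,
-- so at most n/6+1 < n iterations for the n ≥ 5 reaching the loop): exact.
def isPrimeLoop (n : Int) (i : Int) : Nat → Bool
  | 0 => true
  | fuel + 1 =>
      if i * i ≤ n then
        if PySem.Int.mod n i == 0 || PySem.Int.mod n (i + 2) == 0 then false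
        else isPrimeLoop n (i + 6) fuel
      else true

def isPrime (n : Int) : Bool :=
  if n ≤ 1 then false
  else if n ≤ 3 then true
  else if PySem.Int.mod n 2 == 0 || PySem.Int.mod n 3 == 0 then false
  else isPrimeLoop n 5 n.toNat

-- consecutive_primes_count: the Python `while True` loop, ported with fuel (2*b+4).toNat.
-- Exact: the run stops at n = 0 unless b is a prime p (f(0) = b), stops by n = p unless
-- a = -p (f(p) = p*(p+a+1) is prime only when it equals p), and stops by n = 2p always
-- (f(2p) = p*(2p+1) is composite), so the loop runs at most 2b+1 ≤ fuel iterations.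
def countAux (a b : Int) (n : Int) : Nat → Int
  | 0 => n
  | fuel + 1 =>
      if isPrime (n * n + a * n + b) then countAux a b (n + 1) fuel else n

def consecutive_primes_count (a b : Int) : Int :=
  countAux a b 0 (2 * b + 4).toNat

-- the body of A's inner loop
def stepA (a : Int) (s : Int × Int × Int) (b : Int) : Int × Int × Int :=
  let count := consecutive_primes_count a b
  if count > s.1 then (count, a, b) else s

def find_best_coefficients (limit : Int) : List Int :=
  let s := (PySem.List.pyRange (-limit + 1) limit 1).foldl
      (fun s a => (PySem.List.pyRange (-limit) (limit + 1) 1).foldl (stepA a) s)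
      ((0 : Int), (0 : Int), (0 : Int))
  [s.2.1, s.2.2]

-- ===== PORT B =====
-- B's recursive _run_length(a, b, n): length of the prime run starting at n.
-- The Python recursion is unbounded but terminates; ported with fuel (2*b+4).toNat,
-- which bounds the depth by the same argument as for A's loop above: exact.
def runLenFrom (a b : Int) (n : Int) : Nat → Int
  | 0 => 0
  | fuel + 1 =>
      if isPrime (n * n + a * n + b) then 1 + runLenFrom a b (n + 1) fuel else 0

def keyB (ab : Int × Int) : Int := runLenFrom ab.1 ab.2 0 (2 * ab.2 + 4).toNat

def find_best_coefficients_alt (limit : Int) : List Int :=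
  if limit < 2 then [0, 0]
  else
    match PySem.List.max?
        ((PySem.List.pyRange (-limit + 1) limit 1).flatMap
          (fun a => (((PySem.List.pyRange 2 (limit + 1) 1).filter isPrime)).map (fun b => (a, b))))
        keyB with
    | some ab => [ab.1, ab.2]
    | none => [0, 0]   -- unreachable: the candidate list is ≠ [] when limit ≥ 2 (Python's max never sees an empty stream)

-- ===== PRECONDITION & SPEC =====
def Spec_find_best_coefficients (limit : Int) (out : List Int) : Prop := out = find_best_coefficients_alt limit
instance (limit : Int) (out : List Int) : Decidable (Spec_find_best_coefficients limit out) := by unfold Spec_find_best_coefficients; infer_instance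

-- ===== CLAIM (what is proved, stated in full; the proofs are below) =====
def Claim_equal_find_best_coefficients : Prop := ∀ (limit : Int), Dom_find_best_coefficients limit → Spec_find_best_coefficients limit (find_best_coefficients limit)

-- ===== LEMMAS AND PROOFS =====

-- B's run length from n is A's final n minus the start n
theorem countAux_eq_add_runLenFrom (a b : Int) (fuel : Nat) :
    ∀ n : Int, countAux a b n fuel = n + runLenFrom a b n fuel := by
  induction fuel with
  | zero => intro n; simp [countAux, runLenFrom]
  | succ f ih =>
      intro n
      simp only [countAux, runLenFrom]
      by_cases h : isPrime (n * n + a * n + b) = true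
      · simp [h, ih]; ring
      · simp [h]

theorem keyB_eq (ab : Int × Int) : keyB ab = consecutive_primes_count ab.1 ab.2 := by
  simp [keyB, consecutive_primes_count, countAux_eq_add_runLenFrom]

theorem isPrime_of_le_one {b : Int} (h : b ≤ 1) : isPrime b = false := by
  simp [isPrime, h]

theorem countAux_ge (a b : Int) (fuel : Nat) : ∀ n : Int, n ≤ countAux a b n fuel := by
  induction fuel with
  | zero => intro n; simp [countAux]
  | succ f ih =>
      intro n
      simp only [countAux]
      split
      · exact le_trans (by omega) (ih (n + 1))
      · exact le_refl n

theorem count_ge_one {a b : Int} (h : isPrime b = true) :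
    1 ≤ consecutive_primes_count a b := by
  have hb : 2 ≤ b := by
    by_contra hb
    rw [isPrime_of_le_one (by omega)] at h
    exact absurd h (by simp)
  have hf : ∃ f, (2 * b + 4).toNat = f + 1 := by
    refine ⟨(2 * b + 4).toNat - 1, ?_⟩; omega
  obtain ⟨f, hf⟩ := hf
  unfold consecutive_primes_count
  rw [hf]
  have hv : (0 : Int) * 0 + a * 0 + b = b := by ring
  rw [countAux, hv, h]
  simpa using countAux_ge a b f 1

theorem count_eq_zero {a b : Int} (h : isPrime b = false) :
    consecutive_primes_count a b = 0 := by
  unfold consecutive_primes_count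
  cases hf : (2 * b + 4).toNat with
  | zero => rfl
  | succ f =>
      have hv : (0 : Int) * 0 + a * 0 + b = b := by ring
      rw [countAux, hv, h]
      simp

theorem stepA_nonneg {a : Int} {s : Int × Int × Int} {b : Int} (h : 0 ≤ s.1) :
    0 ≤ (stepA a s b).1 := by
  by_cases hc : consecutive_primes_count a b > s.1 <;> simp [stepA, hc] <;> omega

theorem stepA_skip {a : Int} {s : Int × Int × Int} {b : Int}
    (hs : 0 ≤ s.1) (hb : isPrime b = false) : stepA a s b = s := by
  unfold stepA
  simp [count_eq_zero hb]
  omega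

theorem foldl_stepA_nonneg (a : Int) (l : List Int) (s : Int × Int × Int)
    (h : 0 ≤ s.1) : 0 ≤ (l.foldl (stepA a) s).1 := by
  induction l generalizing s with
  | nil => exact h
  | cons b t ih => exact ih _ (stepA_nonneg h)

theorem foldl_stepA_filter (a : Int) (l : List Int) (s : Int × Int × Int)
    (h : 0 ≤ s.1) :
    l.foldl (stepA a) s = (l.filter isPrime).foldl (stepA a) s := by
  induction l generalizing s with
  | nil => rfl
  | cons b t ih =>
      by_cases hb : isPrime b = true
      · simp only [List.foldl_cons, List.filter_cons, hb, if_true]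
        exact ih _ (stepA_nonneg h)
      · rw [Bool.not_eq_true] at hb
        simp only [List.foldl_cons, List.filter_cons, hb, stepA_skip h hb]
        exact ih _ h

-- the b-range filtered to primes: entries below 2 never survive the filter
theorem filter_range_lo (hi : Int) : ∀ (k : Nat) (lo : Int), lo = 2 - (k : Int) →
    (PySem.List.pyRange lo hi 1).filter isPrime
      = (PySem.List.pyRange 2 hi 1).filter isPrime := by
  intro k
  induction k with
  | zero => intro lo hlo; simp at hlo; rw [hlo]
  | succ m ih =>
      intro lo hlo
      have hlo2 : lo ≤ 1 := by omega
      by_cases hlt : lo < hi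
      · rw [PySem.List.pyRange_one_cons hlt]
        simp only [List.filter_cons, isPrime_of_le_one hlo2, Bool.false_eq_true, if_false]
        exact ih (lo + 1) (by omega)
      · have h1 : PySem.List.pyRange lo hi 1 = [] := by
          simp [PySem.List.pyRange_one]; omega
        have h2 : PySem.List.pyRange 2 hi 1 = [] := by
          simp [PySem.List.pyRange_one]; omega
        rw [h1, h2]

theorem outer_fold_eq (ra : List Int) (rb : List Int) (s : Int × Int × Int)
    (h : 0 ≤ s.1) :
    ra.foldl (fun s a => rb.foldl (stepA a) s) s
      = ra.foldl (fun s a => (rb.filter isPrime).foldl (stepA a) s) s := by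
  induction ra generalizing s with
  | nil => rfl
  | cons a t ih =>
      simp only [List.foldl_cons]
      rw [← foldl_stepA_filter a rb s h]
      exact ih _ (foldl_stepA_nonneg a rb s h)

-- proof-side names for the pair-level step and max?'s fold body
def step2 (s : Int × Int × Int) (c : Int × Int) : Int × Int × Int := stepA c.1 s c.2

def maxStep (acc : Option (Int × Int)) (c : Int × Int) : Option (Int × Int) :=
  match acc with
  | none => some c
  | some m => if keyB m < keyB c then some c else some m

theorem max?_eq_foldl (cs : List (Int × Int)) :
    PySem.List.max? cs keyB = cs.foldl maxStep none := by
  unfold PySem.List.max?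
  apply PySem.List.foldl_congr_mem
  intro acc x _
  cases acc <;> rfl

-- A's nested loops over (a, prime b) are one fold over the flattened candidate list
theorem nested_eq_pairs (pb : List Int) : ∀ (ra : List Int) (s : Int × Int × Int),
    ra.foldl (fun s a => pb.foldl (stepA a) s) s
      = (ra.flatMap (fun a => pb.map (fun b => (a, b)))).foldl step2 s := by
  intro ra
  induction ra with
  | nil => intro s; rfl
  | cons a t ih =>
      intro s
      simp only [List.foldl_cons, List.flatMap_cons, List.foldl_append, List.foldl_map]
      rw [← ih]
      rfl

-- once the running best holds a real candidate, A's fold tracks max?'s fold exactly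
theorem fold_tracks_max (cs : List (Int × Int)) : ∀ m : Int × Int,
    cs.foldl step2 (consecutive_primes_count m.1 m.2, m.1, m.2)
      = (match cs.foldl maxStep (some m) with
         | some m' => (consecutive_primes_count m'.1 m'.2, m'.1, m'.2)
         | none => ((0 : Int), (0 : Int), (0 : Int))) := by
  induction cs with
  | nil => intro m; rfl
  | cons c t ih =>
      intro m
      simp only [List.foldl_cons]
      have hstep : step2 (consecutive_primes_count m.1 m.2, m.1, m.2) c
          = if keyB m < keyB c then (consecutive_primes_count c.1 c.2, c.1, c.2)
            else (consecutive_primes_count m.1 m.2, m.1, m.2) := by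
        simp only [step2, stepA, keyB_eq, gt_iff_lt]
      by_cases h : keyB m < keyB c
      · rw [hstep, if_pos h]
        simpa [maxStep, h] using ih c
      · rw [hstep, if_neg h]
        simpa [maxStep, h] using ih m

-- every candidate pair carries a prime second component
theorem cands_prime {limit : Int} {c : Int × Int}
    (h : c ∈ (PySem.List.pyRange (-limit + 1) limit 1).flatMap
        (fun a => ((PySem.List.pyRange 2 (limit + 1) 1).filter isPrime).map (fun b => (a, b)))) :
    isPrime c.2 = true := by
  simp only [List.mem_flatMap, List.mem_map, List.mem_filter] at h
  obtain ⟨a, _, b, ⟨_, hb⟩, rfl⟩ := h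
  exact hb

theorem cands_ne_nil {limit : Int} (h : 2 ≤ limit) :
    (PySem.List.pyRange (-limit + 1) limit 1).flatMap
        (fun a => ((PySem.List.pyRange 2 (limit + 1) 1).filter isPrime).map (fun b => (a, b)))
      ≠ [] := by
  intro hnil
  have hmem : ((-limit + 1 : Int), (2 : Int)) ∈
      (PySem.List.pyRange (-limit + 1) limit 1).flatMap
        (fun a => ((PySem.List.pyRange 2 (limit + 1) 1).filter isPrime).map (fun b => (a, b))) := by
    simp only [List.mem_flatMap, List.mem_map, List.mem_filter]
    refine ⟨-limit + 1, ?_, 2, ⟨?_, by decide⟩, rfl⟩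
    · rw [PySem.List.mem_pyRange_one]; omega
    · rw [PySem.List.mem_pyRange_one]; omega
  rw [hnil] at hmem
  exact absurd hmem (List.not_mem_nil)

-- ===== VERDICT (by name: the statement is the Claim_ definition above) =====
theorem find_best_coefficients_spec : Claim_equal_find_best_coefficients := by
  intro limit _
  unfold Spec_find_best_coefficients find_best_coefficients find_best_coefficients_alt
  rw [outer_fold_eq _ _ _ (by norm_num)]
  by_cases hl : limit < 2
  · rw [if_pos hl]
    by_cases h0 : limit ≤ 0
    · -- the a-range is empty, A's fold never runs
      rw [PySem.List.pyRange_one_eq_nil (show limit ≤ -limit + 1 by omega)]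
      rfl
    · -- limit = 1: no b in [-1, 2) is prime, every inner fold is the identity
      have hfil : (PySem.List.pyRange (-limit) (limit + 1) 1).filter isPrime = [] := by
        rw [filter_range_lo (limit + 1) (2 + limit).toNat (-limit) (by omega)]
        rw [PySem.List.pyRange_one_eq_nil (show (limit : Int) + 1 ≤ 2 by omega)]
        rfl
      rw [hfil]
      simp only [List.foldl_nil, PySem.List.foldl_ignore]
  · rw [if_neg hl]
    replace hl : 2 ≤ limit := by omega
    have hfil : (PySem.List.pyRange (-limit) (limit + 1) 1).filter isPrime
        = (PySem.List.pyRange 2 (limit + 1) 1).filter isPrime :=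
      filter_range_lo (limit + 1) (2 + limit).toNat (-limit) (by omega)
    rw [hfil, nested_eq_pairs]
    cases hcs : (PySem.List.pyRange (-limit + 1) limit 1).flatMap
        (fun a => ((PySem.List.pyRange 2 (limit + 1) 1).filter isPrime).map (fun b => (a, b))) with
    | nil => exact absurd hcs (cands_ne_nil hl)
    | cons c t =>
        have hc : isPrime c.2 = true := cands_prime (hcs ▸ List.mem_cons_self)
        have hk : consecutive_primes_count c.1 c.2 > 0 := by
          have := count_ge_one (a := c.1) hc; omega
        have hfirst : step2 ((0 : Int), (0 : Int), (0 : Int)) c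
            = (consecutive_primes_count c.1 c.2, c.1, c.2) := by
          simp [step2, stepA, hk]
        rw [List.foldl_cons, hfirst, fold_tracks_max, max?_eq_foldl, List.foldl_cons]
        have hm : maxStep none c = some c := rfl
        rw [hm]
        cases t.foldl maxStep (some c) <;> rfl
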